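-- pv_equiv track=rewrite | github.com/jiwon2121/Algorithm | day24/container.py | go
-- ===== SOURCE A (Python) =====
-- def go(wt, cp):
--     used = [0 for _ in range(len(wt))]
--     total = 0
--     for c in cp:
--         for i, w in enumerate(wt):
--             if w <= c and not used[i]:
--                 total += w
--                 used[i] = 1
--                 break
--
--     return total
-- ===== SOURCE B (Python) =====
-- INF = 1 << 62
--
--
-- def _build(ws):
--     # tournament tree over ws (non-empty): ('L', w) | ('N', min, left, right)
--     if len(ws) == 1:
--         return ('L', ws[0])
--     mid = len(ws) // 2
--     l = _build(ws[:mid])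
--     r = _build(ws[mid:])
--     return ('N', min(l[1], r[1]), l, r)
--
--
-- def _take(t, c):
--     # pre: t's min <= c; remove the leftmost leaf with weight <= c,
--     # returning (that weight, tree with the leaf overwritten by INF)
--     if t[0] == 'L':
--         return t[1], ('L', INF)
--     _, _, l, r = t
--     if l[1] <= c:
--         w, nl = _take(l, c)
--         return w, ('N', min(nl[1], r[1]), nl, r)
--     w, nr = _take(r, c)
--     return w, ('N', min(l[1], nr[1]), l, nr)
--
--
-- def go(wt, cp):
--     if not wt:
--         return 0
--     t = _build(wt)
--     total = 0
--     for c in cp: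
--         if t[1] <= c:
--             w, t = _take(t, c)
--             total += w
--     return total
-- ===== Notes on version B (the rewrite author's own statement) =====
-- stated objective: faster
-- what changed: Replaced A's per-capacity linear scan over all weights (with a used-flag array) by a tournament (min-segment) tree over the weights, answering each 'leftmost unused weight <= c' query and deleting it in O(log n).
import Mathlib
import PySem

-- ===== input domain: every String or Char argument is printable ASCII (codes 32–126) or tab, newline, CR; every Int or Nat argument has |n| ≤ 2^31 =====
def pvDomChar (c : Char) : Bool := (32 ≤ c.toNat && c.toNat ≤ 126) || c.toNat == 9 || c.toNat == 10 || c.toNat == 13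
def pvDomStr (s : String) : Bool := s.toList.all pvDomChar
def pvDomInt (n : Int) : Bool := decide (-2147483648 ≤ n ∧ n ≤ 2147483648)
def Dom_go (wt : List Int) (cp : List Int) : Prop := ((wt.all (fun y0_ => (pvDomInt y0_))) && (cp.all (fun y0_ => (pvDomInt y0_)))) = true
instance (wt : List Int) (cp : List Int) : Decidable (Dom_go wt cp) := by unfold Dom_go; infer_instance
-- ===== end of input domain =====

-- B replaces A's per-capacity linear scan over all weights with a tournament
-- (min) tree, answering each "leftmost unused weight ≤ c" query in O(log n):
-- O((n+m) log n) instead of O(n·m).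

-- ===== PORT A =====
-- A's inner `for i, w in enumerate(wt): … break` loop: first (i, w) with
-- w ≤ c and used[i] == 0 (used[i] ported with pyGetD; i is always in range).
def goScan (used : List Int) (c : Int) : List (Int × Int) → Option (Int × Int)
  | [] => none
  | (i, w) :: rest =>
    if w ≤ c ∧ PySem.List.pyGetD used i 0 = 0 then some (i, w)
    else goScan used c rest

def goStep (wt : List Int) (st : List Int × Int) (c : Int) : List Int × Int :=
  match goScan st.1 c (PySem.List.enumerate wt 0) with
  | none => st
  | some (i, w) => (PySem.List.pySetD st.1 i 1, st.2 + w)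

def go (wt : List Int) (cp : List Int) : Int :=
  (cp.foldl (goStep wt) (List.replicate wt.length 0, 0)).2

-- ===== PORT B =====
def segINF : Int := 4611686018427387904  -- 1 << 62

inductive SegTree where
  | leaf : Int → SegTree
  | node : Int → SegTree → SegTree → SegTree
deriving DecidableEq, Repr

def SegTree.minv : SegTree → Int
  | .leaf w => w
  | .node m _ _ => m

-- _build; python's ws[:mid] / ws[mid:] are List.take / List.drop.
-- segBuild [] is never reached (go_alt only builds for nonempty wt).
def segBuild : List Int → SegTree
  | [] => .leaf segINF
  | [w] => .leaf w
  | w₁ :: w₂ :: ws =>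
    let l := segBuild ((w₁ :: w₂ :: ws).take ((w₁ :: w₂ :: ws).length / 2))
    let r := segBuild ((w₁ :: w₂ :: ws).drop ((w₁ :: w₂ :: ws).length / 2))
    .node (min l.minv r.minv) l r
termination_by ws => ws.length
decreasing_by
  · simp; omega
  · simp; omega

-- _take
def segTake (c : Int) : SegTree → Int × SegTree
  | .leaf w => (w, .leaf segINF)
  | .node _ l r =>
    if l.minv ≤ c then
      let p := segTake c l
      (p.1, .node (min p.2.minv r.minv) p.2 r)
    else
      let p := segTake c r
      (p.1, .node (min l.minv p.2.minv) l p.2)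

def goAltStep (st : SegTree × Int) (c : Int) : SegTree × Int :=
  if st.1.minv ≤ c then
    let p := segTake c st.1
    (p.2, st.2 + p.1)
  else st

def go_alt (wt : List Int) (cp : List Int) : Int :=
  if wt.isEmpty then 0
  else (cp.foldl goAltStep (segBuild wt, 0)).2

-- ===== PRECONDITION & SPEC =====
def Spec_go (wt : List Int) (cp : List Int) (out : Int) : Prop := out = go_alt wt cp
instance (wt : List Int) (cp : List Int) (out : Int) : Decidable (Spec_go wt cp out) := by unfold Spec_go; infer_instance

-- ===== CLAIM (what is proved, stated in full; the proofs are below) =====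
def Claim_equal_go : Prop := ∀ (wt : List Int) (cp : List Int), Dom_go wt cp → Spec_go wt cp (go wt cp)

-- ===== LEMMAS AND PROOFS =====

def leaves : SegTree → List Int
  | .leaf w => [w]
  | .node _ l r => leaves l ++ leaves r

def SegWf : SegTree → Prop
  | .leaf _ => True
  | .node m l r => m = min l.minv r.minv ∧ SegWf l ∧ SegWf r

-- current weights as A sees them: wt masked by the used flags
def maskL : List Int → List Int → List Int :=
  List.zipWith (fun w u => if u = 0 then w else segINF)

-- remove the leftmost entry ≤ c of a masked list, returning it and the rest
def maskStep (c : Int) : List Int → Option (Int × List Int)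
  | [] => none
  | w :: ws =>
    if w ≤ c then some (w, segINF :: ws)
    else (maskStep c ws).map (fun p => (p.1, w :: p.2))

-- first index j with wt[j] ≤ c and used[j] = 0
def firstIdx (c : Int) : List Int → List Int → Option Nat
  | [], _ => none
  | _, [] => none
  | w :: ws, u :: us =>
    if w ≤ c ∧ u = 0 then some 0 else (firstIdx c ws us).map (· + 1)

theorem minv_le_iff (t : SegTree) (hwf : SegWf t) (c : Int) :
    t.minv ≤ c ↔ ∃ w ∈ leaves t, w ≤ c := by
  induction t with
  | leaf w => simp [SegTree.minv, leaves]
  | node m l r ihl ihr =>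
    obtain ⟨hm, hl, hr⟩ := hwf
    have hnode : (SegTree.node m l r).minv = m := rfl
    rw [hnode, hm, min_le_iff, ihl hl, ihr hr]
    simp only [leaves, List.mem_append]
    constructor
    · rintro (⟨w, hw, h⟩ | ⟨w, hw, h⟩) <;> exact ⟨w, by tauto, h⟩
    · rintro ⟨w, hw | hw, h⟩
      · exact Or.inl ⟨w, hw, h⟩
      · exact Or.inr ⟨w, hw, h⟩

theorem maskStep_eq_none_iff (c : Int) (xs : List Int) :
    maskStep c xs = none ↔ ∀ w ∈ xs, ¬ w ≤ c := by
  induction xs with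
  | nil => simp [maskStep]
  | cons w ws ih =>
    simp only [maskStep, List.mem_cons]
    split_ifs with h
    · simp [h]
    · cases hm : maskStep c ws <;> simp_all

theorem maskStep_append_left (c : Int) (xs ys xs' : List Int) (w : Int)
    (h : maskStep c xs = some (w, xs')) :
    maskStep c (xs ++ ys) = some (w, xs' ++ ys) := by
  induction xs generalizing xs' with
  | nil => simp [maskStep] at h
  | cons x xs ih =>
    simp only [List.cons_append, maskStep] at h ⊢
    split_ifs at h ⊢ with hx
    · simp only [Option.some.injEq, Prod.mk.injEq] at h
      obtain ⟨rfl, rfl⟩ := h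
      simp
    · cases hm : maskStep c xs with
      | none => simp [hm] at h
      | some p =>
        simp only [hm, Option.map_some, Option.some.injEq, Prod.mk.injEq] at h
        obtain ⟨rfl, rfl⟩ := h
        rw [ih p.2 (by simpa using hm)]
        simp

theorem maskStep_append_none (c : Int) (xs ys : List Int)
    (h : maskStep c xs = none) :
    maskStep c (xs ++ ys) = (maskStep c ys).map (fun p => (p.1, xs ++ p.2)) := by
  induction xs with
  | nil => simp
  | cons x xs ih =>
    simp only [List.cons_append, maskStep] at h ⊢
    split_ifs at h ⊢ with hx
    rw [ih (by simpa using h)]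
    cases maskStep c ys <;> simp

theorem segTake_spec (c : Int) (t : SegTree) (hwf : SegWf t) (h : t.minv ≤ c) :
    maskStep c (leaves t) = some ((segTake c t).1, leaves (segTake c t).2) ∧
      SegWf (segTake c t).2 := by
  induction t with
  | leaf w =>
    simp only [SegTree.minv] at h
    simp [segTake, leaves, maskStep, h, SegWf]
  | node m l r ihl ihr =>
    obtain ⟨hm, hl, hr⟩ := hwf
    by_cases hlc : l.minv ≤ c
    · obtain ⟨h1, h2⟩ := ihl hl hlc
      simp only [segTake, leaves, hlc, if_pos]
      exact ⟨maskStep_append_left c _ _ _ _ h1, by simp [SegWf, h2, hr]⟩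
    · have hrc : r.minv ≤ c := by
        simp only [SegTree.minv, hm, min_le_iff] at h
        tauto
      obtain ⟨h1, h2⟩ := ihr hr hrc
      have hnone : maskStep c (leaves l) = none := by
        rw [maskStep_eq_none_iff]
        intro w hw hwc
        exact hlc ((minv_le_iff l hl c).2 ⟨w, hw, hwc⟩)
      simp only [segTake, leaves, hlc, if_neg, not_false_iff]
      refine ⟨?_, by simp [SegWf, h2, hl]⟩
      rw [maskStep_append_none c _ _ hnone, h1]
      simp

theorem segBuild_spec (ws : List Int) (hne : ws ≠ []) :
    leaves (segBuild ws) = ws ∧ SegWf (segBuild ws) := by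
  fun_induction segBuild with
  | case1 => simp at hne
  | case2 w => simp [leaves, SegWf]
  | case3 w₁ w₂ ws l r ihl ihr =>
    have hl := ihl (List.ne_nil_of_length_pos (by simp))
    have hr := ihr (List.ne_nil_of_length_pos (by simp; omega))
    refine ⟨?_, ?_⟩
    · show leaves l ++ leaves r = _
      rw [hl.1, hr.1, List.take_append_drop]
    · exact ⟨rfl, hl.2, hr.2⟩

-- A's scan over enumerate, started after a prefix `pre` of the used list,
-- computes firstIdx on the remaining suffix.
theorem goScan_eq (c : Int) (wt' : List Int) :
    ∀ (pre suf : List Int), suf.length = wt'.length →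
    goScan (pre ++ suf) c (PySem.List.enumerate wt' (pre.length : Int)) =
      (firstIdx c wt' suf).map (fun j => (((pre.length + j : Nat) : Int), wt'.getD j 0)) := by
  induction wt' with
  | nil =>
    intro pre suf hlen
    simp [PySem.List.enumerate_nil, goScan, firstIdx]
  | cons w ws ih =>
    intro pre suf hlen
    cases suf with
    | nil => simp at hlen
    | cons u us =>
      simp only [List.length_cons] at hlen
      rw [PySem.List.enumerate_cons]
      simp only [goScan]
      have hget : PySem.List.pyGetD (pre ++ u :: us) (pre.length : Int) 0 = u := by
        rw [PySem.List.pyGetD_natCast]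
        simp [List.getD]
      rw [hget]
      by_cases hcond : w ≤ c ∧ u = 0
      · simp [hcond, firstIdx]
      · rw [if_neg hcond]
        simp only [firstIdx, if_neg hcond]
        have : ((pre.length : Int) + 1) = (((pre ++ [u]).length : Nat) : Int) := by
          simp
        rw [this]
        have := ih (pre ++ [u]) us (by omega)
        rw [List.append_assoc] at this
        simp only [List.singleton_append] at this
        rw [this]
        cases firstIdx c ws us with
        | none => simp
        | some j => simp; ring_nf

theorem maskStep_eq (c : Int) (hc : c < segINF) (wt' : List Int) :
    ∀ (suf : List Int), suf.length = wt'.length →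
    maskStep c (maskL wt' suf) =
      (firstIdx c wt' suf).map (fun j => (wt'.getD j 0, maskL wt' (suf.set j 1))) := by
  induction wt' with
  | nil => intro suf hlen; simp [maskL, maskStep, firstIdx]
  | cons w ws ih =>
    intro suf hlen
    cases suf with
    | nil => simp at hlen
    | cons u us =>
      simp only [List.length_cons] at hlen
      simp only [maskL, List.zipWith_cons_cons, maskStep]
      by_cases hu : u = 0
      · subst hu
        rw [show (if (0 : Int) = 0 then w else segINF) = w from if_pos rfl]
        by_cases hw : w ≤ c
        · simp [hw, firstIdx]
        · rw [if_neg hw]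
          simp only [firstIdx, hw, false_and, if_neg, not_false_iff]
          have ih' := ih us (by omega)
          simp only [maskL] at ih'
          rw [ih']
          cases firstIdx c ws us <;> simp
      · rw [show (if u = 0 then w else segINF) = segINF from if_neg hu]
        have hinf : ¬ segINF ≤ c := by omega
        rw [if_neg hinf]
        simp only [firstIdx, hu, and_false, if_neg, not_false_iff]
        have ih' := ih us (by omega)
        simp only [maskL] at ih'
        rw [ih']
        cases firstIdx c ws us <;> simp [hu]

theorem loop_inv (wt : List Int) (cp : List Int)
    (hcs : ∀ c ∈ cp, c < segINF) :
    ∀ (used : List Int) (t : SegTree) (totA totB : Int),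
      used.length = wt.length → SegWf t → leaves t = maskL wt used → totA = totB →
      (cp.foldl (goStep wt) (used, totA)).2 = (cp.foldl goAltStep (t, totB)).2 := by
  induction cp with
  | nil => intro used t totA totB _ _ _ h; simpa using h
  | cons c cp ih =>
    intro used t totA totB hlen hwf hleaves htot
    have hc : c < segINF := hcs c (List.mem_cons_self ..)
    have hcs' : ∀ c' ∈ cp, c' < segINF := fun c' h => hcs c' (List.mem_cons_of_mem _ h)
    simp only [List.foldl_cons]
    have h0 := goScan_eq c wt [] used hlen
    simp only [List.nil_append, List.length_nil, Nat.cast_zero, Nat.zero_add] at h0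
    have hmask := maskStep_eq c hc wt used hlen
    cases hfi : firstIdx c wt used with
    | none =>
      -- nothing fits: A skips, and t.minv ≤ c is false so B skips
      have hA : goStep wt (used, totA) c = (used, totA) := by
        simp only [goStep]
        rw [h0, hfi]
        simp
      have hnone : maskStep c (maskL wt used) = none := by rw [hmask, hfi]; rfl
      have hB : goAltStep (t, totB) c = (t, totB) := by
        simp only [goAltStep]
        rw [if_neg]
        intro habs
        obtain ⟨w, hw, hwc⟩ := (minv_le_iff t hwf c).1 habs
        rw [hleaves] at hw
        exact (maskStep_eq_none_iff c _).1 hnone w hw hwc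
      rw [hA, hB]
      exact ih hcs' used t totA totB hlen hwf hleaves htot
    | some j =>
      have hsome : maskStep c (maskL wt used) =
          some (wt.getD j 0, maskL wt (used.set j 1)) := by rw [hmask, hfi]; rfl
      have hmem : t.minv ≤ c := by
        rw [minv_le_iff t hwf c, hleaves]
        by_contra habs
        push Not at habs
        have hnone := (maskStep_eq_none_iff c (maskL wt used)).2
          (fun w hw => not_le.2 (habs w hw))
        simp [hsome] at hnone
      obtain ⟨htake, hwf'⟩ := segTake_spec c t hwf hmem
      rw [hleaves, hsome] at htake
      simp only [Option.some.injEq, Prod.mk.injEq] at htake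
      obtain ⟨hp1, hp2⟩ := htake
      have hA : goStep wt (used, totA) c = (used.set j 1, totA + wt.getD j 0) := by
        simp only [goStep]
        rw [h0, hfi]
        simp [PySem.List.pySetD_natCast]
      have hB : goAltStep (t, totB) c = ((segTake c t).2, totB + (segTake c t).1) := by
        simp [goAltStep, hmem]
      rw [hA, hB]
      exact ih hcs' (used.set j 1) (segTake c t).2 (totA + wt.getD j 0)
        (totB + (segTake c t).1) (by simp [hlen]) hwf' hp2.symm (by rw [← hp1, htot])

theorem maskL_replicate (wt : List Int) : maskL wt (List.replicate wt.length 0) = wt := by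
  induction wt with
  | nil => rfl
  | cons w ws ih => simp [maskL, List.replicate_succ, List.zipWith_cons_cons] at ih ⊢; exact ih

theorem go_nil (cp : List Int) : ∀ st : List Int × Int, cp.foldl (goStep []) st = st := by
  induction cp with
  | nil => intro st; rfl
  | cons c cp ih =>
    intro st
    simp only [List.foldl_cons]
    have h : goStep [] st c = st := by
      simp [goStep, PySem.List.enumerate_nil, goScan]
    rw [h, ih]

-- ===== VERDICT (by name: the statement is the Claim_ definition above) =====
theorem go_spec : Claim_equal_go := by
  intro wt cp hdom
  unfold Spec_go
  have hcs : ∀ c ∈ cp, c < segINF := by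
    simp only [Dom_go, Bool.and_eq_true, List.all_eq_true, pvDomInt, decide_eq_true_eq] at hdom
    intro c hc
    have := hdom.2 c hc
    simp only [segINF]
    omega
  by_cases hwt : wt = []
  · subst hwt
    simp only [go, List.length_nil, List.replicate_zero]
    rw [go_nil]
    simp [go_alt]
  · obtain ⟨hleaves, hwf⟩ := segBuild_spec wt hwt
    have halt : go_alt wt cp = (cp.foldl goAltStep (segBuild wt, 0)).2 := by
      rw [go_alt, if_neg (by simp [List.isEmpty_iff, hwt])]
    rw [halt]
    show (cp.foldl (goStep wt) (List.replicate wt.length 0, 0)).2 = _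
    exact loop_inv wt cp hcs (List.replicate wt.length 0) (segBuild wt) 0 0
      (by simp) hwf (by rw [hleaves, maskL_replicate]) rfl
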